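-- pv_equiv track=rewrite | github.com/drQedwards/ARC-AGI-3-Agents | agents/templates/world_model_agent.py | _find_rotators
-- ===== SOURCE A (Python) =====
-- from typing import Any, Dict, List, Optional, Set, Tuple
--
-- _INT_ROTATOR: int = 9  # rotator body cells (blue)
--
-- _PLAY_AREA_ROW_LIMIT: int = 56
--
-- def _find_rotators(grid: List[List[int]]) -> List[Tuple[int, int]]:
--     """Find all rotator objects using flood-fill on ``INT<9>`` clusters.
--
--     Returns one representative (top-left-most) position per cluster.
--     """
--     H, W = len(grid), len(grid[0])
--     seen: Set[Tuple[int, int]] = set()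
--     positions: List[Tuple[int, int]] = []
--
--     for r in range(min(H, _PLAY_AREA_ROW_LIMIT)):
--         for c in range(W):
--             if grid[r][c] != _INT_ROTATOR or (r, c) in seen:
--                 continue
--             # Flood-fill to collect the full cluster
--             stack: List[Tuple[int, int]] = [(r, c)]
--             cluster: List[Tuple[int, int]] = []
--             while stack:
--                 cr, cc = stack.pop()
--                 if (cr, cc) in seen:
--                     continue
--                 seen.add((cr, cc))
--                 cluster.append((cr, cc))
--                 for nr, nc in (
--                     (cr - 1, cc),
--                     (cr + 1, cc),
--                     (cr, cc - 1),
--                     (cr, cc + 1),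
--                 ):
--                     if (
--                         0 <= nr < H
--                         and 0 <= nc < W
--                         and grid[nr][nc] == _INT_ROTATOR
--                         and (nr, nc) not in seen
--                     ):
--                         stack.append((nr, nc))
--             # Top-left-most cell is the canonical representative
--             positions.append(min(cluster))
--
--     return positions
-- ===== SOURCE B (Python) =====
-- from typing import Dict, List, Tuple
--
-- _INT_ROTATOR: int = 9
-- _PLAY_AREA_ROW_LIMIT: int = 56
--
--
-- def _find_rotators(grid: List[List[int]]) -> List[Tuple[int, int]]:
--     """Find one representative (top-left-most) position per rotator cluster.
--
--     Merge-based connected-component labelling: every value-9 cell starts as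
--     its own label; each right/down adjacency merges the two labels (keeping
--     the smaller one), so each cluster ends up labelled by its minimum cell.
--     """
--     H, W = len(grid), len(grid[0])
--     label: Dict[Tuple[int, int], Tuple[int, int]] = {}
--     for r in range(H):
--         for c in range(W):
--             if grid[r][c] == _INT_ROTATOR:
--                 label[(r, c)] = (r, c)
--     for (r, c) in list(label):
--         for q in ((r, c + 1), (r + 1, c)):
--             if q in label:
--                 a, b = label[(r, c)], label[q]
--                 if a != b:
--                     lo, hi = (a, b) if a < b else (b, a)
--                     label = {x: (lo if v == hi else v) for x, v in label.items()}
--     return sorted({v for v in label.values() if v[0] < _PLAY_AREA_ROW_LIMIT})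
-- ===== Notes on version B (the rewrite author's own statement) =====
-- stated objective: alternative
-- what changed: Replaces the single-pass DFS flood fill (explicit stack + shared seen set, one min() per cluster, rows scanned only below 56) by merge-based connected-component labelling: every 9-cell starts as its own label, each right/down adjacency merges the two labels keeping the lexicographically smaller cell, and the result is the sorted set of final labels with row < 56.
import Mathlib
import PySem

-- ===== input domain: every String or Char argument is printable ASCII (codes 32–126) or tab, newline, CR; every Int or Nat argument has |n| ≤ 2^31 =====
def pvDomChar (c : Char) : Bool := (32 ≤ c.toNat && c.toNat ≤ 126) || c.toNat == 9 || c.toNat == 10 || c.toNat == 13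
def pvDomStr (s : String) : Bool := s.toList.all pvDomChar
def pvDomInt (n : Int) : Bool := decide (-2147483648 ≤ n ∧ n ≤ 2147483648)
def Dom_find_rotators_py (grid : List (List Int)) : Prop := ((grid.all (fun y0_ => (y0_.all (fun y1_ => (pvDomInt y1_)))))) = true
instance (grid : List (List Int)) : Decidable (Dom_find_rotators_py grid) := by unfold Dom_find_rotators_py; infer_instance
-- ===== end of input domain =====

-- B replaces A's single-pass DFS flood fill by merge-based connected-component labelling
-- (every 9-cell starts as its own label; each right/down adjacency merges two labels keeping
-- the smaller); objective: alternative (a genuinely different algorithm, no stack/seen-set bookkeeping).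

-- shared grid accessor: grid[r][c] as an Option (none = out of range / ragged row)
def pvCell (grid : List (List Int)) (r c : Int) : Option Int :=
  (PySem.List.pyGet? grid r).bind (fun row => PySem.List.pyGet? row c)

-- ===== PORT A =====
-- the four neighbour coordinates, in A's tuple order
def pvNbrs (p : Int × Int) : List (Int × Int) :=
  [(p.1 - 1, p.2), (p.1 + 1, p.2), (p.1, p.2 - 1), (p.1, p.2 + 1)]

-- A's `while stack:` flood fill; the stack's top is the list head (Python pops from the
-- end, so pushing the four neighbours appends them reversed in front).  The fuel argument
-- only makes the recursion structural: the caller passes enough for every admitted input.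
def pvFlood (grid : List (List Int)) (H W : Int) :
    Nat → List (Int × Int) → PySem.Set (Int × Int) → List (Int × Int) →
    PySem.Set (Int × Int) × List (Int × Int)
  | _, [], seen, cluster => (seen, cluster)
  | 0, _ :: _, seen, cluster => (seen, cluster)
  | fuel + 1, p :: rest, seen, cluster =>
    if PySem.Set.contains seen p then pvFlood grid H W fuel rest seen cluster
    else
      let seen' := PySem.Set.add seen p
      let ns := (pvNbrs p).filter (fun q =>
        decide (0 ≤ q.1) && decide (q.1 < H) && decide (0 ≤ q.2) && decide (q.2 < W) &&
        (pvCell grid q.1 q.2 == some 9) && !(PySem.Set.contains seen' q))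
      pvFlood grid H W fuel (ns.reverse ++ rest) seen' (cluster ++ [p])

def find_rotators_py (grid : List (List Int)) : List (Int × Int) :=
  let H : Int := grid.length
  let W : Int := ((PySem.List.pyGet? grid 0).getD []).length
  let res := (PySem.List.pyRange 0 (min H 56) 1).foldl (fun st r =>
    (PySem.List.pyRange 0 W 1).foldl (fun st c =>
      if !(pvCell grid r c == some 9) || PySem.Set.contains st.1 (r, c) then st
      else
        let fc := pvFlood grid H W (5 * (H.toNat * W.toNat) + 1) [(r, c)] st.1 []
        (fc.1, match PySem.List.min2? fc.2 Prod.fst Prod.snd with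
               | some m => st.2 ++ [m]
               | none => st.2)) st)
    (([] : PySem.Set (Int × Int)), ([] : List (Int × Int)))
  res.2

-- ===== PORT B =====
-- Python tuple comparison a < b on int pairs (lexicographic)
def pvLt2 (a b : Int × Int) : Bool := decide (a.1 < b.1 ∨ (a.1 = b.1 ∧ a.2 < b.2))

def find_rotators_py_alt (grid : List (List Int)) : List (Int × Int) :=
  let H : Int := grid.length
  let W : Int := ((PySem.List.pyGet? grid 0).getD []).length
  let label0 : PySem.Dict (Int × Int) (Int × Int) :=
    (PySem.List.pyRange 0 H 1).foldl (fun d r =>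
      (PySem.List.pyRange 0 W 1).foldl (fun d c =>
        if pvCell grid r c == some 9 then d.insert (r, c) (r, c) else d) d) ⟨[]⟩
  let label := label0.keys.foldl (fun lab p =>
    [(p.1, p.2 + 1), (p.1 + 1, p.2)].foldl (fun lab q =>
      if lab.contains q then
        let a := (lab.get? p).getD (0, 0)
        let b := (lab.get? q).getD (0, 0)
        if a ≠ b then
          let lohi := if pvLt2 a b then (a, b) else (b, a)
          lab.items.foldl
            (fun d kv => d.insert kv.1 (if kv.2 == lohi.2 then lohi.1 else kv.2))
            (⟨[]⟩ : PySem.Dict (Int × Int) (Int × Int))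
        else lab
      else lab) lab) label0
  PySem.List.sorted2
    (PySem.Set.ofList (label.values.filter (fun v => decide (v.1 < 56))))
    Prod.fst Prod.snd

-- ===== PRECONDITION & SPEC =====
-- Pre_ excludes the empty grid and grids having a row shorter than row 0 (not full
-- matrices): A raises IndexError on the empty grid and on most such ragged grids
-- (whether it raises on the rest depends on incidental cell values).
def Pre_find_rotators_py (grid : List (List Int)) : Prop :=
  grid ≠ [] ∧ ∀ row ∈ grid, grid.headI.length ≤ row.length
instance (grid : List (List Int)) : Decidable (Pre_find_rotators_py grid) := by
  unfold Pre_find_rotators_py; infer_instance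

def pvWitness_find_rotators_py : List (List Int) := [[9, 0], [0, 9]]

def Spec_find_rotators_py (grid : List (List Int)) (out : List (Int × Int)) : Prop := out = find_rotators_py_alt grid
instance (grid : List (List Int)) (out : List (Int × Int)) : Decidable (Spec_find_rotators_py grid out) := by unfold Spec_find_rotators_py; infer_instance

-- ===== CLAIM (what is proved, stated in full; the proofs are below) =====
def Claim_equal_find_rotators_py : Prop := ∀ (grid : List (List Int)), Dom_find_rotators_py grid → Pre_find_rotators_py grid → Spec_find_rotators_py grid (find_rotators_py grid)

-- ===== LEMMAS AND PROOFS =====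

def pvLe (p q : Int × Int) : Prop := p.1 < q.1 ∨ (p.1 = q.1 ∧ p.2 ≤ q.2)

def pvLtP (p q : Int × Int) : Prop := p.1 < q.1 ∨ (p.1 = q.1 ∧ p.2 < q.2)

def pvBf : (Int × Int) → (Int × Int) → Bool :=
  fun a b => decide (a.1 < b.1) || (!decide (b.1 < a.1) && decide (a.2 < b.2))

theorem pvBf_iff (a b : Int × Int) : pvBf a b = true ↔ pvLtP a b := by
  simp [pvBf, pvLtP]; omega

theorem pvLe_antisymm (a b : Int × Int) (h1 : pvLe a b) (h2 : pvLe b a) : a = b := by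
  unfold pvLe at *
  have : a.1 = b.1 ∧ a.2 = b.2 := by omega
  exact Prod.ext this.1 this.2

theorem pvInsertBy_pairwise (x : Int × Int) (ys : List (Int × Int))
    (h : ys.Pairwise pvLe) : (PySem.List.insertBy pvBf x ys).Pairwise pvLe := by
  induction ys with
  | nil => simp [PySem.List.insertBy]
  | cons y ys ih =>
    rw [PySem.List.insertBy]
    by_cases hb : pvBf x y = true
    · simp only [hb, if_pos]
      have hxy : pvLtP x y := (pvBf_iff _ _).1 hb
      refine List.Pairwise.cons ?_ h
      intro z hz
      rcases List.mem_cons.1 hz with rfl | hz'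
      · unfold pvLtP at hxy; unfold pvLe; omega
      · have hyz : pvLe y z := (List.pairwise_cons.1 h).1 z hz'
        unfold pvLtP at hxy; unfold pvLe at *; omega
    · simp only [hb, if_neg, Bool.not_eq_true]
      obtain ⟨hy, ht⟩ := List.pairwise_cons.1 h
      refine List.Pairwise.cons ?_ (ih ht)
      intro z hz
      rcases (PySem.List.mem_insertBy pvBf x z ys).1 hz with rfl | hz'
      · have := mt (pvBf_iff z y).2 (by simp [hb])
        unfold pvLtP at this; unfold pvLe; omega
      · exact hy z hz'

theorem pvSorted2_eq (xs ys : List (Int × Int)) (hperm : ys.Perm xs) (hp : ys.Pairwise pvLtP) :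
    PySem.List.sorted2 xs Prod.fst Prod.snd = ys := by
  have hfold : ∀ (l acc : List (Int × Int)), acc.Pairwise pvLe →
      (l.foldl (fun acc x => PySem.List.insertBy pvBf x acc) acc).Pairwise pvLe := by
    intro l
    induction l with
    | nil => intro acc h; exact h
    | cons x l ih => intro acc h; exact ih _ (pvInsertBy_pairwise x acc h)
  have hzdef : PySem.List.sorted2 xs Prod.fst Prod.snd =
      xs.foldl (fun acc x => PySem.List.insertBy pvBf x acc) [] := by
    rfl
  have hzp : (PySem.List.sorted2 xs Prod.fst Prod.snd).Pairwise pvLe := by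
    rw [hzdef]; exact hfold xs [] (by simp)
  have hzperm : (PySem.List.sorted2 xs Prod.fst Prod.snd).Perm ys :=
    (PySem.List.sorted2_perm xs Prod.fst Prod.snd false).trans hperm.symm
  exact List.Perm.eq_of_pairwise (fun a b _ _ h1 h2 => pvLe_antisymm a b h1 h2) hzp
    (hp.imp (by intro a b h; unfold pvLtP at h; unfold pvLe; omega)) hzperm

def pvH (g : List (List Int)) : Int := g.length

def pvW (g : List (List Int)) : Int := ((PySem.List.pyGet? g 0).getD []).length

def pvOk (g : List (List Int)) (p : Int × Int) : Prop :=
  0 ≤ p.1 ∧ p.1 < pvH g ∧ 0 ≤ p.2 ∧ p.2 < pvW g ∧ pvCell g p.1 p.2 = some 9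

def pvAdj (g : List (List Int)) (p q : Int × Int) : Prop :=
  pvOk g p ∧ pvOk g q ∧
    ((q.1 = p.1 - 1 ∧ q.2 = p.2) ∨ (q.1 = p.1 + 1 ∧ q.2 = p.2) ∨
     (q.1 = p.1 ∧ q.2 = p.2 - 1) ∨ (q.1 = p.1 ∧ q.2 = p.2 + 1))

def pvConn (g : List (List Int)) (p q : Int × Int) : Prop :=
  Relation.ReflTransGen (pvAdj g) p q

def pvRep (g : List (List Int)) (p : Int × Int) : Prop :=
  pvOk g p ∧ ∀ q, pvConn g p q → pvLe p q

def pvTarget (g : List (List Int)) (p : Int × Int) : Prop := pvRep g p ∧ p.1 < 56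

-- ===== scan lists =====

def pvScan (g : List (List Int)) (B : Int) : List (Int × Int) :=
  (PySem.List.pyRange 0 B 1).flatMap (fun r =>
    (PySem.List.pyRange 0 (pvW g) 1).map (fun c => (r, c)))

theorem pvScan_mem (g : List (List Int)) (B : Int) (p : Int × Int) :
    p ∈ pvScan g B ↔ 0 ≤ p.1 ∧ p.1 < B ∧ 0 ≤ p.2 ∧ p.2 < pvW g := by
  unfold pvScan
  simp only [List.mem_flatMap, List.mem_map, PySem.List.mem_pyRange_one]
  constructor
  · rintro ⟨r, ⟨hr1, hr2⟩, c, ⟨hc1, hc2⟩, rfl⟩; exact ⟨hr1, hr2, hc1, hc2⟩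
  · rintro ⟨h1, h2, h3, h4⟩; exact ⟨p.1, ⟨h1, h2⟩, p.2, ⟨h3, h4⟩, rfl⟩

theorem pvScan_pairwise (g : List (List Int)) (B : Int) :
    (pvScan g B).Pairwise pvLtP := by
  unfold pvScan
  rw [List.pairwise_flatMap]
  constructor
  · intro r _
    refine List.Pairwise.map _ ?_ (PySem.List.pairwise_lt_pyRange_one 0 (pvW g))
    intro c1 c2 h; unfold pvLtP; right; exact ⟨rfl, h⟩
  · refine List.Pairwise.imp_of_mem ?_ (PySem.List.pairwise_lt_pyRange_one 0 B)
    rintro r1 r2 _ _ h x hx y hy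
    simp only [List.mem_map] at hx hy
    obtain ⟨c1, _, rfl⟩ := hx; obtain ⟨c2, _, rfl⟩ := hy
    unfold pvLtP; left; exact h

def pvK (g : List (List Int)) : List (Int × Int) :=
  (pvScan g (pvH g)).filter (fun p => pvCell g p.1 p.2 == some 9)

theorem pvK_mem (g : List (List Int)) (p : Int × Int) : p ∈ pvK g ↔ pvOk g p := by
  unfold pvK pvOk
  rw [List.mem_filter, pvScan_mem]
  simp; tauto

theorem pvK_nodup (g : List (List Int)) : (pvK g).Nodup :=
  (((pvScan_pairwise g (pvH g)).imp
    (fun h => by rintro rfl; unfold pvLtP at h; omega)).filter _)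

-- ===== dict-as-function view =====

def pvMkD (g : List (List Int)) (f : Int × Int → Int × Int) : PySem.Dict (Int × Int) (Int × Int) :=
  ⟨(pvK g).map (fun p => (p, f p))⟩

theorem pvFind_map_pair (K : List (Int × Int)) (f : Int × Int → Int × Int) (p : Int × Int)
    (hp : p ∈ K) :
    Option.map (fun x => x.2) (List.find? (fun e => e.1 == p) (K.map (fun x => (x, f x)))) =
      some (f p) := by
  induction K with
  | nil => simp at hp
  | cons x K ih =>
    simp only [List.map_cons, List.find?_cons]
    by_cases hx : x = p
    · subst hx; simp
    · simp only [show ((x, f x).1 == p) = false by simpa using hx]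
      exact ih ((List.mem_cons.1 hp).resolve_left (fun h => hx h.symm))

theorem pvMkD_get?_mem (g : List (List Int)) (f : Int × Int → Int × Int) (p : Int × Int)
    (hp : p ∈ pvK g) : (pvMkD g f).get? p = some (f p) := by
  unfold pvMkD PySem.Dict.get?
  exact pvFind_map_pair (pvK g) f p hp

theorem pvMkD_contains (g : List (List Int)) (f : Int × Int → Int × Int) (q : Int × Int) :
    (pvMkD g f).contains q = decide (q ∈ pvK g) := by
  unfold pvMkD PySem.Dict.contains
  by_cases h : q ∈ pvK g
  · simp only [decide_eq_true h, List.any_map, List.any_eq_true, Function.comp_def]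
    exact ⟨q, h, by simp⟩
  · simp only [decide_eq_false h, List.any_map, List.any_eq_false, Function.comp_def]
    intro x hx e
    apply h
    rw [← beq_iff_eq.1 e]
    exact hx

theorem pvMkD_keys (g : List (List Int)) (f : Int × Int → Int × Int) :
    (pvMkD g f).keys = pvK g := by
  simp [pvMkD, PySem.Dict.keys, List.map_map, Function.comp_def]

theorem pvMkD_values (g : List (List Int)) (f : Int × Int → Int × Int) :
    (pvMkD g f).values = (pvK g).map f := by
  simp [pvMkD, PySem.Dict.values, List.map_map, Function.comp_def]


-- ===== connectivity utilities =====

theorem pvAdj_symm (g : List (List Int)) : Symmetric (pvAdj g) := by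
  rintro p q ⟨hp, hq, hgeo⟩
  refine ⟨hq, hp, ?_⟩
  rcases hgeo with ⟨h1, h2⟩ | ⟨h1, h2⟩ | ⟨h1, h2⟩ | ⟨h1, h2⟩ <;> omega

theorem pvConn_symm (g : List (List Int)) {p q : Int × Int} (h : pvConn g p q) :
    pvConn g q p := Relation.ReflTransGen.symmetric (pvAdj_symm g) h

theorem pvConn_trans (g : List (List Int)) {p q r : Int × Int}
    (h1 : pvConn g p q) (h2 : pvConn g q r) : pvConn g p r := h1.trans h2

theorem pvConn_ok (g : List (List Int)) {p q : Int × Int} (h : pvConn g p q) :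
    p = q ∨ pvOk g q := by
  induction h with
  | refl => exact Or.inl rfl
  | tail _ hstep _ => exact Or.inr hstep.2.1

-- ===== the merge loop =====

def pvEdges (g : List (List Int)) : List ((Int × Int) × (Int × Int)) :=
  (pvK g).flatMap (fun p => [(p, (p.1, p.2 + 1)), (p, (p.1 + 1, p.2))])

def pvStep (lab : PySem.Dict (Int × Int) (Int × Int)) (e : (Int × Int) × (Int × Int)) :
    PySem.Dict (Int × Int) (Int × Int) :=
  if lab.contains e.2 then
    let a := (lab.get? e.1).getD (0, 0)
    let b := (lab.get? e.2).getD (0, 0)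
    if a ≠ b then
      let lohi := if pvLt2 a b then (a, b) else (b, a)
      lab.items.foldl
        (fun d kv => d.insert kv.1 (if kv.2 == lohi.2 then lohi.1 else kv.2))
        (⟨[]⟩ : PySem.Dict (Int × Int) (Int × Int))
    else lab
  else lab

def pvGood (g : List (List Int)) (f : Int × Int → Int × Int) : Prop :=
  (∀ p, p ∈ pvK g → pvConn g p (f p)) ∧ (∀ p, p ∈ pvK g → pvLe (f p) p)

theorem pvLt2_iff (a b : Int × Int) : pvLt2 a b = true ↔ pvLtP a b := by
  simp [pvLt2, pvLtP]

theorem pvStep_rebuild (g : List (List Int)) (f : Int × Int → Int × Int) (lo hi : Int × Int) :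
    ((pvMkD g f).items.foldl
        (fun d kv => d.insert kv.1 (if kv.2 == hi then lo else kv.2))
        (⟨[]⟩ : PySem.Dict (Int × Int) (Int × Int))) =
      pvMkD g (fun x => if f x = hi then lo else f x) := by
  have hnd : (((pvMkD g f).items).map Prod.fst).Nodup := by
    have : ((pvMkD g f).items.map Prod.fst) = pvK g := by
      simp [pvMkD, List.map_map, Function.comp_def]
    rw [this]; exact pvK_nodup g
  apply PySem.Dict.ext
  exact (PySem.Dict.items_foldl_insert_fresh ((pvMkD g f).items) Prod.fst
      (fun kv => if kv.2 == hi then lo else kv.2) (⟨[]⟩) (fun a _ => rfl) hnd).trans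
    (by simp [pvMkD, List.map_map, Function.comp_def, beq_iff_eq])

theorem pvMerge_fold (g : List (List Int)) :
    ∀ (todo : List ((Int × Int) × (Int × Int))) (f : Int × Int → Int × Int),
      (∀ e ∈ todo, e.1 ∈ pvK g ∧ (e.2 = (e.1.1, e.1.2 + 1) ∨ e.2 = (e.1.1 + 1, e.1.2))) →
      pvGood g f →
      ∃ f', todo.foldl pvStep (pvMkD g f) = pvMkD g f' ∧ pvGood g f' ∧
        (∀ p q, f p = f q → f' p = f' q) ∧
        (∀ e ∈ todo, e.2 ∈ pvK g → f' e.1 = f' e.2) := by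
  intro todo
  induction todo with
  | nil =>
    intro f _ hgood
    exact ⟨f, rfl, hgood, fun p q h => h, by simp⟩
  | cons e todo ih =>
    intro f hshape hgood
    obtain ⟨hp, hq2⟩ := hshape e (by simp)
    have hshape' : ∀ e' ∈ todo, e'.1 ∈ pvK g ∧
        (e'.2 = (e'.1.1, e'.1.2 + 1) ∨ e'.2 = (e'.1.1 + 1, e'.1.2)) :=
      fun e' he' => hshape e' (by simp [he'])
    rw [List.foldl_cons]
    by_cases hq : e.2 ∈ pvK g
    case neg =>
      have hstep : pvStep (pvMkD g f) e = pvMkD g f := by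
        unfold pvStep
        rw [pvMkD_contains, decide_eq_false hq]
        simp
      rw [hstep]
      obtain ⟨f', heq, hgood', hpres, hrest⟩ := ih f hshape' hgood
      refine ⟨f', heq, hgood', hpres, ?_⟩
      intro e' he'
      rcases List.mem_cons.1 he' with rfl | he''
      · exact fun hc => absurd hc hq
      · exact hrest e' he''
    · have hcont : (pvMkD g f).contains e.2 = true := by
        rw [pvMkD_contains]; exact decide_eq_true hq
      have hga : (pvMkD g f).get? e.1 = some (f e.1) := pvMkD_get?_mem g f e.1 hp
      have hgb : (pvMkD g f).get? e.2 = some (f e.2) := pvMkD_get?_mem g f e.2 hq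
      have hadj : pvAdj g e.1 e.2 := by
        refine ⟨(pvK_mem g e.1).1 hp, (pvK_mem g e.2).1 hq, ?_⟩
        rcases hq2 with h | h <;> rw [h] <;> simp
      by_cases hab : f e.1 = f e.2
      · have hstep : pvStep (pvMkD g f) e = pvMkD g f := by
          unfold pvStep
          rw [hcont, if_pos rfl, hga, hgb]
          simp [hab]
        rw [hstep]
        obtain ⟨f', heq, hgood', hpres, hrest⟩ := ih f hshape' hgood
        refine ⟨f', heq, hgood', hpres, ?_⟩
        intro e' he'
        rcases List.mem_cons.1 he' with rfl | he''
        · exact fun _ => hpres _ _ hab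
        · exact hrest e' he''
      · -- merge: collapse hi into lo
        set a := f e.1 with ha
        set b := f e.2 with hb
        set lo := if pvLt2 a b then a else b with hlo
        set hi := if pvLt2 a b then b else a with hhi
        have hlh : pvLtP lo hi ∧ ((lo = a ∧ hi = b) ∨ (lo = b ∧ hi = a)) := by
          by_cases hc : pvLt2 a b = true
          · rw [hlo, hhi, if_pos hc, if_pos hc]
            exact ⟨(pvLt2_iff a b).1 hc, Or.inl ⟨rfl, rfl⟩⟩
          · rw [hlo, hhi, if_neg hc, if_neg hc]
            have h1 : ¬ pvLtP a b := fun h => hc ((pvLt2_iff a b).2 h)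
            have hne : a.1 ≠ b.1 ∨ a.2 ≠ b.2 := by
              by_contra hcon
              rw [not_or, not_not, not_not] at hcon
              exact hab (Prod.ext hcon.1 hcon.2)
            have : pvLtP b a := by
              unfold pvLtP at h1 ⊢
              rcases hne with h | h <;> omega
            exact ⟨this, Or.inr ⟨rfl, rfl⟩⟩
        set clo := fun v => if v = hi then lo else v with hclo
        have hstep : pvStep (pvMkD g f) e = pvMkD g (fun x => clo (f x)) := by
          unfold pvStep
          rw [hcont, if_pos rfl, hga, hgb]
          simp only [Option.getD_some]
          rw [if_pos hab]
          show ((pvMkD g f).items.foldl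
            (fun (d : PySem.Dict (Int × Int) (Int × Int)) kv => d.insert kv.1
              (if kv.2 == (if pvLt2 a b then (a, b) else (b, a)).2
               then (if pvLt2 a b then (a, b) else (b, a)).1 else kv.2))
            (⟨[]⟩ : PySem.Dict (Int × Int) (Int × Int))) = _
          have h2 : (if pvLt2 a b then (a, b) else (b, a)).2 = hi := by
            by_cases hc : pvLt2 a b = true <;> simp [hc, hhi]
          have h1 : (if pvLt2 a b then (a, b) else (b, a)).1 = lo := by
            by_cases hc : pvLt2 a b = true <;> simp [hc, hlo]
          rw [h1, h2]
          exact pvStep_rebuild g f lo hi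
        rw [hstep]
        -- connectivity of lo and hi
        have hconl : pvConn g e.1 a := hgood.1 e.1 hp
        have hconr : pvConn g e.2 b := hgood.1 e.2 hq
        have hconab : pvConn g a b :=
          pvConn_trans g (pvConn_symm g hconl)
            (pvConn_trans g (Relation.ReflTransGen.single hadj) hconr)
        have hconhl : pvConn g hi lo := by
          rcases hlh.2 with ⟨hl, hh⟩ | ⟨hl, hh⟩
          · rw [hl, hh]; exact pvConn_symm g hconab
          · rw [hl, hh]; exact hconab
        have hgood1 : pvGood g (fun x => clo (f x)) := by
          constructor
          · intro x hx
            simp only [hclo]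
            by_cases hfx : f x = hi
            · rw [if_pos hfx]
              exact pvConn_trans g (hfx ▸ hgood.1 x hx) hconhl
            · rw [if_neg hfx]; exact hgood.1 x hx
          · intro x hx
            simp only [hclo]
            by_cases hfx : f x = hi
            · rw [if_pos hfx]
              have h1 : pvLe (f x) x := hgood.2 x hx
              have h2 : pvLtP lo hi := hlh.1
              rw [hfx] at h1
              unfold pvLe pvLtP at *
              omega
            · rw [if_neg hfx]; exact hgood.2 x hx
        obtain ⟨f', heq, hgood', hpres, hrest⟩ := ih (fun x => clo (f x)) hshape' hgood1
        refine ⟨f', heq, hgood', fun p q h => hpres p q (by simp [h]), ?_⟩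
        intro e' he'
        rcases List.mem_cons.1 he' with rfl | he''
        · intro _
          apply hpres
          show clo a = clo b
          have hca : clo a = lo := by
            simp only [hclo]
            rcases hlh.2 with ⟨hl, hh⟩ | ⟨hl, hh⟩
            · rw [if_neg (fun hcon => hab (by rw [hcon, hh]))]; exact hl.symm
            · rw [if_pos hh.symm]
          have hcb : clo b = lo := by
            simp only [hclo]
            rcases hlh.2 with ⟨hl, hh⟩ | ⟨hl, hh⟩
            · rw [if_pos hh.symm]
            · rw [if_neg (fun hcon => hab (by rw [hcon, hh]))]; exact hl.symm
          rw [hca, hcb]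
        · exact hrest e' he''

theorem pvEdges_mem (g : List (List Int)) (p q : Int × Int) :
    (p, q) ∈ pvEdges g ↔ p ∈ pvK g ∧ (q = (p.1, p.2 + 1) ∨ q = (p.1 + 1, p.2)) := by
  unfold pvEdges
  simp only [List.mem_flatMap, List.mem_cons, List.not_mem_nil, or_false,
    Prod.mk.injEq]
  constructor
  · rintro ⟨x, hx, ⟨rfl, rfl⟩ | ⟨rfl, rfl⟩⟩
    · exact ⟨hx, Or.inl rfl⟩
    · exact ⟨hx, Or.inr rfl⟩
  · rintro ⟨hp, rfl | rfl⟩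
    · exact ⟨p, hp, Or.inl ⟨rfl, rfl⟩⟩
    · exact ⟨p, hp, Or.inr ⟨rfl, rfl⟩⟩

theorem pvAlt_char (g : List (List Int)) :
    ∃ f', pvGood g f' ∧ (∀ p q, pvConn g p q → f' p = f' q) ∧
      find_rotators_py_alt g = PySem.List.sorted2
        (PySem.Set.ofList (((pvK g).map f').filter (fun v => decide (v.1 < 56))))
        Prod.fst Prod.snd := by
  have hl0 : ((PySem.List.pyRange 0 (pvH g) 1).foldl (fun d r =>
      (PySem.List.pyRange 0 (pvW g) 1).foldl (fun d c =>
        if pvCell g r c == some 9 then d.insert (r, c) (r, c) else d) d)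
      (⟨[]⟩ : PySem.Dict (Int × Int) (Int × Int))) = pvMkD g id := by
    have e1 : (fun (d : PySem.Dict (Int × Int) (Int × Int)) (r : Int) =>
        (PySem.List.pyRange 0 (pvW g) 1).foldl (fun d c =>
          if pvCell g r c == some 9 then d.insert (r, c) (r, c) else d) d) =
        fun d r => ((PySem.List.pyRange 0 (pvW g) 1).map (fun c => ((r, c) : Int × Int))).foldl
          (fun d p => if pvCell g p.1 p.2 == some 9 then d.insert p p else d) d := by
      funext d r
      rw [List.foldl_map]
    rw [e1, ← List.foldl_flatMap]
    rw [show ((PySem.List.pyRange 0 (pvH g) 1).flatMap (fun r =>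
        (PySem.List.pyRange 0 (pvW g) 1).map (fun c => ((r, c) : Int × Int)))) = pvScan g (pvH g)
      from rfl]
    rw [show ((pvScan g (pvH g)).foldl
        (fun (d : PySem.Dict (Int × Int) (Int × Int)) p =>
          if pvCell g p.1 p.2 == some 9 then d.insert p p else d) ⟨[]⟩) =
        ((pvK g).foldl (fun d p => d.insert p p) ⟨[]⟩) from (List.foldl_filter).symm]
    apply PySem.Dict.ext
    exact (PySem.Dict.items_foldl_insert_fresh (pvK g) (fun a => a) (fun a => a)
        (⟨[]⟩ : PySem.Dict (Int × Int) (Int × Int)) (fun a _ => rfl) (by simpa using pvK_nodup g)).trans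
      (by simp [pvMkD])
  obtain ⟨f', heq, hgood', hpres, hE⟩ := pvMerge_fold g (pvEdges g) id
    (by
      intro e he
      rcases e with ⟨p, q⟩
      obtain ⟨hp, hq⟩ := (pvEdges_mem g p q).1 he
      exact ⟨hp, hq⟩)
    (⟨fun p _ => Relation.ReflTransGen.refl, fun p _ => by show pvLe p p; unfold pvLe; omega⟩)
  have hadjconst : ∀ p q, pvAdj g p q → f' p = f' q := by
    intro p q hadj
    obtain ⟨hokp, hokq, hgeo⟩ := hadj
    have hpK : p ∈ pvK g := (pvK_mem g p).2 hokp
    have hqK : q ∈ pvK g := (pvK_mem g q).2 hokq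
    rcases hgeo with ⟨h1, h2⟩ | ⟨h1, h2⟩ | ⟨h1, h2⟩ | ⟨h1, h2⟩
    · -- q is above p: p is the down-neighbour of q
      exact (hE (q, p) ((pvEdges_mem g q p).2 ⟨hqK, Or.inr (Prod.ext (by omega) (by omega))⟩) hpK).symm
    · exact hE (p, q) ((pvEdges_mem g p q).2 ⟨hpK, Or.inr (Prod.ext (by omega) (by omega))⟩) hqK
    · exact (hE (q, p) ((pvEdges_mem g q p).2 ⟨hqK, Or.inl (Prod.ext (by omega) (by omega))⟩) hpK).symm
    · exact hE (p, q) ((pvEdges_mem g p q).2 ⟨hpK, Or.inl (Prod.ext (by omega) (by omega))⟩) hqK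
  have hconnconst : ∀ p q, pvConn g p q → f' p = f' q := by
    intro p q h
    induction h with
    | refl => rfl
    | tail _ hstep ih => exact ih.trans (hadjconst _ _ hstep)
  refine ⟨f', hgood', hconnconst, ?_⟩
  show (let H : Int := g.length
        let W : Int := ((PySem.List.pyGet? g 0).getD []).length
        let label0 : PySem.Dict (Int × Int) (Int × Int) :=
          (PySem.List.pyRange 0 H 1).foldl (fun d r =>
            (PySem.List.pyRange 0 W 1).foldl (fun d c =>
              if pvCell g r c == some 9 then d.insert (r, c) (r, c) else d) d) ⟨[]⟩
        let label := label0.keys.foldl (fun lab p =>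
          [(p.1, p.2 + 1), (p.1 + 1, p.2)].foldl (fun lab q =>
            if lab.contains q then
              let a := (lab.get? p).getD (0, 0)
              let b := (lab.get? q).getD (0, 0)
              if a ≠ b then
                let lohi := if pvLt2 a b then (a, b) else (b, a)
                lab.items.foldl
                  (fun d kv => d.insert kv.1 (if kv.2 == lohi.2 then lohi.1 else kv.2))
                  (⟨[]⟩ : PySem.Dict (Int × Int) (Int × Int))
              else lab
            else lab) lab) label0
        PySem.List.sorted2
          (PySem.Set.ofList (label.values.filter (fun v => decide (v.1 < 56))))
          Prod.fst Prod.snd) = _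
  simp only
  rw [show ((PySem.List.pyRange 0 ((g.length : Int)) 1).foldl (fun d r =>
      (PySem.List.pyRange 0 (((PySem.List.pyGet? g 0).getD []).length : Int) 1).foldl (fun d c =>
        if pvCell g r c == some 9 then d.insert (r, c) (r, c) else d) d)
      (⟨[]⟩ : PySem.Dict (Int × Int) (Int × Int))) = pvMkD g id from hl0]
  rw [pvMkD_keys]
  have e2 : ((pvK g).foldl (fun lab p =>
      [(p.1, p.2 + 1), (p.1 + 1, p.2)].foldl (fun lab q =>
        if lab.contains q then
          let a := (lab.get? p).getD (0, 0)
          let b := (lab.get? q).getD (0, 0)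
          if a ≠ b then
            let lohi := if pvLt2 a b then (a, b) else (b, a)
            lab.items.foldl
              (fun d kv => d.insert kv.1 (if kv.2 == lohi.2 then lohi.1 else kv.2))
              (⟨[]⟩ : PySem.Dict (Int × Int) (Int × Int))
          else lab
        else lab) lab) (pvMkD g id)) = (pvEdges g).foldl pvStep (pvMkD g id) := by
    unfold pvEdges
    have e2gen : ∀ (K : List (Int × Int)) (lab : PySem.Dict (Int × Int) (Int × Int)),
        K.foldl (fun lab p =>
          [(p.1, p.2 + 1), (p.1 + 1, p.2)].foldl (fun lab q =>
            if lab.contains q then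
              let a := (lab.get? p).getD (0, 0)
              let b := (lab.get? q).getD (0, 0)
              if a ≠ b then
                let lohi := if pvLt2 a b then (a, b) else (b, a)
                lab.items.foldl
                  (fun d kv => d.insert kv.1 (if kv.2 == lohi.2 then lohi.1 else kv.2))
                  (⟨[]⟩ : PySem.Dict (Int × Int) (Int × Int))
              else lab
            else lab) lab) lab =
        (K.flatMap (fun p => [(p, (p.1, p.2 + 1)), (p, (p.1 + 1, p.2))])).foldl pvStep lab := by
      intro K
      induction K with
      | nil => intro lab; rfl
      | cons p K ih =>
        intro lab
        rw [List.foldl_cons, List.flatMap_cons, List.foldl_append, ← ih]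
        congr 1
    exact e2gen (pvK g) (pvMkD g id)
  rw [e2, heq, pvMkD_values]

theorem pvB_char (g : List (List Int)) :
    ∃ S : List (Int × Int), find_rotators_py_alt g = PySem.List.sorted2 S Prod.fst Prod.snd ∧
      S.Nodup ∧ (∀ p, p ∈ S ↔ pvTarget g p) := by
  obtain ⟨f', hgood, hconst, heq⟩ := pvAlt_char g
  refine ⟨_, heq, PySem.Set.nodup_ofList _, ?_⟩
  intro x
  rw [PySem.Set.mem_ofList, List.mem_filter]
  simp only [List.mem_map, decide_eq_true_eq]
  constructor
  · rintro ⟨⟨p, hpK, rfl⟩, hlt⟩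
    have hconn : pvConn g p (f' p) := hgood.1 p hpK
    have hok : pvOk g (f' p) := by
      rcases pvConn_ok g hconn with h | h
      · exact h ▸ (pvK_mem g p).1 hpK
      · exact h
    refine ⟨⟨hok, ?_⟩, hlt⟩
    intro z hz
    have hpz : pvConn g p z := pvConn_trans g hconn hz
    have hfz : f' p = f' z := hconst p z hpz
    rcases pvConn_ok g hz with h | h
    · rw [← h]; unfold pvLe; omega
    · have hzK : z ∈ pvK g := (pvK_mem g z).2 h
      rw [hfz]; exact hgood.2 z hzK
  · rintro ⟨⟨hok, hmin⟩, hlt⟩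
    have hxK : x ∈ pvK g := (pvK_mem g x).2 hok
    have hfx : f' x = x := pvLe_antisymm _ _ (hgood.2 x hxK) (hmin (f' x) (hgood.1 x hxK))
    exact ⟨⟨x, hxK, hfx⟩, hlt⟩

def pvRA (g : List (List Int)) (seen : PySem.Set (Int × Int)) (s x : Int × Int) : Prop :=
  Relation.ReflTransGen (fun a b => pvAdj g a b ∧ b ∉ seen) s x

def pvNew (g : List (List Int)) (seen : PySem.Set (Int × Int))
    (stack : List (Int × Int)) (x : Int × Int) : Prop :=
  ∃ s ∈ stack, s ∉ seen ∧ pvRA g seen s x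

theorem pvRA_mono (g : List (List Int)) (seen : PySem.Set (Int × Int)) (p s x : Int × Int)
    (h : pvRA g (PySem.Set.add seen p) s x) : pvRA g seen s x := by
  induction h with
  | refl => exact Relation.ReflTransGen.refl
  | tail _ hstep ih =>
    exact ih.tail ⟨hstep.1, fun hc => hstep.2 ((PySem.Set.mem_add seen p _).2 (Or.inl hc))⟩

theorem pvRA_conn (g : List (List Int)) (seen : PySem.Set (Int × Int)) (s x : Int × Int)
    (h : pvRA g seen s x) : pvConn g s x := by
  induction h with
  | refl => exact Relation.ReflTransGen.refl
  | tail _ hstep ih => exact ih.tail hstep.1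

theorem pvRA_of_conn (g : List (List Int)) (seen : PySem.Set (Int × Int)) (s x : Int × Int)
    (hdisj : ∀ y, pvConn g s y → y ∉ seen) (h : pvConn g s x) : pvRA g seen s x := by
  induction h with
  | refl => exact Relation.ReflTransGen.refl
  | tail hc hstep ih => exact ih.tail ⟨hstep, hdisj _ (hc.tail hstep)⟩

theorem pvRA_decomp1 (g : List (List Int)) (seen : PySem.Set (Int × Int)) (p x : Int × Int)
    (h : pvRA g seen p x) :
    x = p ∨ ∃ n, pvAdj g p n ∧ n ∉ PySem.Set.add seen p ∧ pvRA g (PySem.Set.add seen p) n x := by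
  induction h with
  | refl => exact Or.inl rfl
  | tail _ hstep ih =>
    rename_i y x' _
    by_cases hx : x' = p
    · exact Or.inl hx
    · right
      have hx' : x' ∉ PySem.Set.add seen p := fun hc => by
        rcases (PySem.Set.mem_add seen p x').1 hc with hc' | hc'
        · exact hstep.2 hc'
        · exact hx hc'
      rcases ih with rfl | ⟨n, hadj, hn, hr⟩
      · exact ⟨x', hstep.1, hx', Relation.ReflTransGen.refl⟩
      · exact ⟨n, hadj, hn, hr.tail ⟨hstep.1, hx'⟩⟩

theorem pvRA_decomp2 (g : List (List Int)) (seen : PySem.Set (Int × Int)) (p s x : Int × Int)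
    (h : pvRA g seen s x) :
    pvRA g (PySem.Set.add seen p) s x ∨ pvRA g seen p x := by
  induction h with
  | refl => exact Or.inl Relation.ReflTransGen.refl
  | tail _ hstep ih =>
    rename_i y x' _
    by_cases hx : x' = p
    · exact Or.inr (hx ▸ Relation.ReflTransGen.refl)
    · rcases ih with ih | ih
      · exact Or.inl (ih.tail ⟨hstep.1, fun hc => by
          rcases (PySem.Set.mem_add seen p x').1 hc with hc' | hc'
          · exact hstep.2 hc'
          · exact hx hc'⟩)
      · exact Or.inr (ih.tail hstep)

theorem pvNew_step (g : List (List Int)) (seen : PySem.Set (Int × Int))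
    (p : Int × Int) (rest ns : List (Int × Int)) (hps : p ∉ seen)
    (hns : ∀ n, n ∈ ns ↔ pvAdj g p n ∧ n ∉ PySem.Set.add seen p) :
    ∀ x, pvNew g seen (p :: rest) x ↔
      (x = p ∨ pvNew g (PySem.Set.add seen p) (ns ++ rest) x) := by
  intro x
  constructor
  · rintro ⟨s, hs, hsn, hr⟩
    have hpcase : pvRA g seen p x → x = p ∨ pvNew g (PySem.Set.add seen p) (ns ++ rest) x := by
      intro hrp
      rcases pvRA_decomp1 g seen p x hrp with h | ⟨n, hadj, hn, hr'⟩
      · exact Or.inl h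
      · exact Or.inr ⟨n, List.mem_append.2 (Or.inl ((hns n).2 ⟨hadj, hn⟩)), hn, hr'⟩
    rcases List.mem_cons.1 hs with rfl | hs'
    · exact hpcase hr
    · rcases pvRA_decomp2 g seen p s x hr with h | h
      · by_cases hsp : s ∈ PySem.Set.add seen p
        · -- s ∈ seen.add p but s ∉ seen, so s = p
          have : s = p := by
            rcases (PySem.Set.mem_add seen p s).1 hsp with hc | hc
            · exact absurd hc hsn
            · exact hc
          exact hpcase (this ▸ hr)
        · exact Or.inr ⟨s, List.mem_append.2 (Or.inr hs'), hsp, h⟩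
      · exact hpcase h
  · rintro (rfl | ⟨s, hs, hsn, hr⟩)
    · exact ⟨x, List.mem_cons_self, hps, Relation.ReflTransGen.refl⟩
    · rcases List.mem_append.1 hs with hsns | hsrest
      · refine ⟨p, List.mem_cons_self, hps, ?_⟩
        have hadj := ((hns s).1 hsns).1
        have hsseen : s ∉ seen := fun hc =>
          ((hns s).1 hsns).2 ((PySem.Set.mem_add seen p s).2 (Or.inl hc))
        exact Relation.ReflTransGen.head ⟨hadj, hsseen⟩ (pvRA_mono g seen p s x hr)
      · exact ⟨s, List.mem_cons.2 (Or.inr hsrest), fun hc =>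
          hsn ((PySem.Set.mem_add seen p s).2 (Or.inl hc)), pvRA_mono g seen p s x hr⟩

theorem pvContains_iff (seen : PySem.Set (Int × Int)) (x : Int × Int) :
    PySem.Set.contains seen x = true ↔ x ∈ seen := by
  unfold PySem.Set.contains
  exact List.contains_iff_mem

theorem pvCountP_lt (l : List (Int × Int)) (a : Int × Int) (p q : (Int × Int) → Bool)
    (ha : a ∈ l) (himp : ∀ x, q x = true → p x = true)
    (hpa : p a = true) (hqa : q a = false) : l.countP q < l.countP p := by
  induction l with
  | nil => simp at ha
  | cons x l ih =>
    rw [List.countP_cons, List.countP_cons]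
    have hmono : l.countP q ≤ l.countP p := List.countP_mono_left (fun x _ hx => himp x hx)
    rcases List.mem_cons.1 ha with rfl | ha'
    · rw [hpa, hqa]; simp; omega
    · have := ih ha'
      have hx := himp x
      by_cases hqx : q x = true
      · rw [hqx, hx hqx]; omega
      · rw [Bool.not_eq_true] at hqx
        rw [hqx]
        by_cases hpx : p x = true <;> simp [hpx] <;> omega

theorem pvNs_mem (g : List (List Int)) (p : Int × Int) (seen' : PySem.Set (Int × Int)) (n : Int × Int)
    (hokp : pvOk g p) :
    n ∈ (pvNbrs p).filter (fun q =>
        decide (0 ≤ q.1) && decide (q.1 < pvH g) && decide (0 ≤ q.2) && decide (q.2 < pvW g) &&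
        (pvCell g q.1 q.2 == some 9) && !(PySem.Set.contains seen' q)) ↔
      pvAdj g p n ∧ n ∉ seen' := by
  rw [List.mem_filter]
  simp only [Bool.and_eq_true, decide_eq_true_eq, beq_iff_eq, Bool.not_eq_eq_eq_not,
    Bool.not_true, pvNbrs, List.mem_cons, List.not_mem_nil, or_false]
  constructor
  · rintro ⟨hmem, ⟨⟨⟨⟨h1, h2⟩, h3⟩, h4⟩, h5⟩, h6⟩
    refine ⟨⟨hokp, ⟨h1, h2, h3, h4, h5⟩, ?_⟩, fun hc => by rw [(pvContains_iff seen' n).2 hc] at h6; simp at h6⟩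
    rcases hmem with rfl | rfl | rfl | rfl
    · exact Or.inl ⟨rfl, rfl⟩
    · exact Or.inr (Or.inl ⟨rfl, rfl⟩)
    · exact Or.inr (Or.inr (Or.inl ⟨rfl, rfl⟩))
    · exact Or.inr (Or.inr (Or.inr ⟨rfl, rfl⟩))
  · rintro ⟨⟨_, hokn, hgeo⟩, hns⟩
    obtain ⟨g1, g2, g3, g4, g5⟩ := hokn
    refine ⟨?_, ⟨⟨⟨⟨⟨g1, g2⟩, g3⟩, g4⟩, g5⟩, ?_⟩⟩
    · rcases hgeo with ⟨h1, h2⟩ | ⟨h1, h2⟩ | ⟨h1, h2⟩ | ⟨h1, h2⟩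
      · exact Or.inl (Prod.ext h1 h2)
      · exact Or.inr (Or.inl (Prod.ext h1 h2))
      · exact Or.inr (Or.inr (Or.inl (Prod.ext h1 h2)))
      · exact Or.inr (Or.inr (Or.inr (Prod.ext h1 h2)))
    · exact Bool.eq_false_iff.2 (fun hc => hns ((pvContains_iff seen' n).1 hc))

theorem pvFlood_spec (g : List (List Int)) :
    ∀ (fuel : Nat) (stack : List (Int × Int)) (seen : PySem.Set (Int × Int))
      (cluster : List (Int × Int)),
      (∀ q ∈ stack, pvOk g q) →
      5 * ((pvScan g (pvH g)).countP (fun q => !PySem.Set.contains seen q)) + stack.length ≤ fuel →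
      (∀ x, x ∈ (pvFlood g (pvH g) (pvW g) fuel stack seen cluster).1 ↔
          x ∈ seen ∨ pvNew g seen stack x) ∧
      (∀ x, x ∈ (pvFlood g (pvH g) (pvW g) fuel stack seen cluster).2 ↔
          x ∈ cluster ∨ pvNew g seen stack x) ∧
      (cluster.Nodup → (∀ x ∈ cluster, x ∈ seen) →
        (pvFlood g (pvH g) (pvW g) fuel stack seen cluster).2.Nodup) := by
  intro fuel
  induction fuel with
  | zero =>
    intro stack seen cluster _ hfuel
    have hstack : stack = [] := List.length_eq_zero_iff.1 (by omega)
    subst hstack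
    refine ⟨?_, ?_, ?_⟩ <;> simp [pvFlood, pvNew]
    exact fun hnd _ => hnd
  | succ fuel ih =>
    intro stack seen cluster hok hfuel
    match stack with
    | [] =>
      refine ⟨?_, ?_, ?_⟩ <;> simp [pvFlood, pvNew]
      exact fun hnd _ => hnd
    | p :: rest =>
      rw [show pvFlood g (pvH g) (pvW g) (fuel + 1) (p :: rest) seen cluster =
        (if PySem.Set.contains seen p then pvFlood g (pvH g) (pvW g) fuel rest seen cluster
         else
           pvFlood g (pvH g) (pvW g) fuel
             (((pvNbrs p).filter (fun q =>
               decide (0 ≤ q.1) && decide (q.1 < pvH g) && decide (0 ≤ q.2) && decide (q.2 < pvW g) &&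
               (pvCell g q.1 q.2 == some 9) && !(PySem.Set.contains (PySem.Set.add seen p) q))).reverse ++ rest)
             (PySem.Set.add seen p) (cluster ++ [p])) from rfl]
      by_cases hseen : PySem.Set.contains seen p = true
      · rw [if_pos hseen]
        have hpseen : p ∈ seen := (pvContains_iff seen p).1 hseen
        obtain ⟨c1, c2, c3⟩ := ih rest seen cluster (fun q hq => hok q (List.mem_cons_of_mem p hq))
          (by simp only [List.length_cons] at hfuel; omega)
        have hnew : ∀ x, pvNew g seen (p :: rest) x ↔ pvNew g seen rest x := by
          intro x
          constructor
          · rintro ⟨s, hs, hsn, hr⟩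
            rcases List.mem_cons.1 hs with rfl | hs'
            · exact absurd hpseen hsn
            · exact ⟨s, hs', hsn, hr⟩
          · rintro ⟨s, hs, hsn, hr⟩
            exact ⟨s, List.mem_cons_of_mem p hs, hsn, hr⟩
        exact ⟨fun x => (c1 x).trans (by rw [hnew x]),
               fun x => (c2 x).trans (by rw [hnew x]), c3⟩
      · rw [if_neg hseen]
        rw [Bool.not_eq_true] at hseen
        have hpnseen : p ∉ seen := fun hc => by
          rw [(pvContains_iff seen p).2 hc] at hseen; simp at hseen
        have hokp : pvOk g p := hok p List.mem_cons_self
        set ns := (pvNbrs p).filter (fun q =>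
            decide (0 ≤ q.1) && decide (q.1 < pvH g) && decide (0 ≤ q.2) && decide (q.2 < pvW g) &&
            (pvCell g q.1 q.2 == some 9) && !(PySem.Set.contains (PySem.Set.add seen p) q)) with hnsdef
        have hnschar : ∀ n, n ∈ ns ↔ pvAdj g p n ∧ n ∉ PySem.Set.add seen p := by
          intro n; rw [hnsdef]; exact pvNs_mem g p (PySem.Set.add seen p) n hokp
        have hoknew : ∀ q ∈ ns.reverse ++ rest, pvOk g q := by
          intro q hq
          rcases List.mem_append.1 hq with h | h
          · exact (((hnschar q).1 (List.mem_reverse.1 h)).1).2.1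
          · exact hok q (List.mem_cons_of_mem p h)
        have hcount : (pvScan g (pvH g)).countP
            (fun q => !PySem.Set.contains (PySem.Set.add seen p) q) <
            (pvScan g (pvH g)).countP (fun q => !PySem.Set.contains seen q) := by
          refine pvCountP_lt _ p _ _ ?_ ?_ ?_ ?_
          · exact (pvScan_mem g (pvH g) p).2 ⟨hokp.1, hokp.2.1, hokp.2.2.1, hokp.2.2.2.1⟩
          · intro x hx
            rw [Bool.not_eq_eq_eq_not, Bool.not_true, ← Bool.not_eq_true] at hx ⊢
            intro hc
            exact hx ((pvContains_iff _ x).2 ((PySem.Set.mem_add seen p x).2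
              (Or.inl ((pvContains_iff _ x).1 hc))))
          · rw [Bool.not_eq_eq_eq_not, Bool.not_true]; exact hseen
          · rw [Bool.not_eq_eq_eq_not, Bool.not_false, pvContains_iff]
            exact (PySem.Set.mem_add seen p p).2 (Or.inr rfl)
        have hnslen : ns.length ≤ 4 := by
          rw [hnsdef]
          calc (List.filter _ (pvNbrs p)).length ≤ (pvNbrs p).length :=
                List.length_filter_le _ _
            _ = 4 := rfl
        have hfuel' : 5 * ((pvScan g (pvH g)).countP
            (fun q => !PySem.Set.contains (PySem.Set.add seen p) q)) +
            (ns.reverse ++ rest).length ≤ fuel := by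
          rw [List.length_append, List.length_reverse]
          simp only [List.length_cons] at hfuel
          omega
        obtain ⟨c1, c2, c3⟩ := ih (ns.reverse ++ rest) (PySem.Set.add seen p) (cluster ++ [p])
          hoknew hfuel'
        have hstep : ∀ x, pvNew g seen (p :: rest) x ↔
            (x = p ∨ pvNew g (PySem.Set.add seen p) (ns ++ rest) x) :=
          pvNew_step g seen p rest ns hpnseen hnschar
        have hrevnew : ∀ x, pvNew g (PySem.Set.add seen p) (ns.reverse ++ rest) x ↔
            pvNew g (PySem.Set.add seen p) (ns ++ rest) x := by
          intro x
          unfold pvNew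
          constructor <;> rintro ⟨s, hs, h1, h2⟩ <;> refine ⟨s, ?_, h1, h2⟩ <;>
            rcases List.mem_append.1 hs with h | h
          · exact List.mem_append.2 (Or.inl (List.mem_reverse.1 h))
          · exact List.mem_append.2 (Or.inr h)
          · exact List.mem_append.2 (Or.inl (List.mem_reverse.2 h))
          · exact List.mem_append.2 (Or.inr h)
        refine ⟨?_, ?_, ?_⟩
        · intro x
          rw [c1 x, hrevnew x, hstep x, PySem.Set.mem_add]
          tauto
        · intro x
          rw [c2 x, hrevnew x, hstep x, List.mem_append]
          simp only [List.mem_singleton]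
          tauto
        · intro hnd hsub
          refine c3 ?_ ?_
          · rw [List.nodup_append]
            refine ⟨hnd, List.nodup_singleton p, ?_⟩
            intro a ha b hb
            have hbp : b = p := by simpa using hb
            subst hbp
            exact fun he => hpnseen (he ▸ hsub a ha)
          · intro x hx
            rcases List.mem_append.1 hx with h | h
            · exact (PySem.Set.mem_add seen p x).2 (Or.inl (hsub x h))
            · rw [List.mem_singleton] at h
              exact (PySem.Set.mem_add seen p x).2 (Or.inr h)


-- ===== Python min() over int pairs =====

theorem pvMin2_aux :
    ∀ (xs : List (Int × Int)) (c : Int × Int),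
      ∃ r, PySem.List.min2? (c :: xs) Prod.fst Prod.snd = some r ∧
        (r = c ∨ r ∈ xs) ∧ pvLe r c ∧ ∀ y ∈ xs, pvLe r y := by
  intro xs
  induction xs with
  | nil =>
    intro c
    exact ⟨c, rfl, Or.inl rfl, by unfold pvLe; omega, by simp⟩
  | cons x xs ih =>
    intro c
    have hstep : PySem.List.min2? (c :: x :: xs) Prod.fst Prod.snd =
        PySem.List.min2? ((if (decide (x.1 < c.1) || !decide (c.1 < x.1) && decide (x.2 < c.2)) = true
          then x else c) :: xs) Prod.fst Prod.snd := by
      unfold PySem.List.min2?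
      rw [List.foldl_cons, List.foldl_cons, List.foldl_cons]
      congr 1
      by_cases hb : (decide (x.1 < c.1) || !decide (c.1 < x.1) && decide (x.2 < c.2)) = true
      · rw [if_pos hb]
        show (if (decide (x.1 < c.1) || !decide (c.1 < x.1) && decide (x.2 < c.2)) = true
          then some x else some c) = some x
        rw [if_pos hb]
      · rw [if_neg hb]
        show (if (decide (x.1 < c.1) || !decide (c.1 < x.1) && decide (x.2 < c.2)) = true
          then some x else some c) = some c
        rw [if_neg hb]
    by_cases hb : (decide (x.1 < c.1) || !decide (c.1 < x.1) && decide (x.2 < c.2)) = true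
    · rw [if_pos hb] at hstep
      have hxc : pvLtP x c := by
        unfold pvLtP
        simp only [Bool.or_eq_true, Bool.and_eq_true, Bool.not_eq_eq_eq_not,
          Bool.not_true, decide_eq_true_eq, decide_eq_false_iff_not] at hb
        omega
      obtain ⟨r, heq, hrmem, hrc, hrall⟩ := ih x
      refine ⟨r, hstep.trans heq, ?_, ?_, ?_⟩
      · rcases hrmem with rfl | h
        · exact Or.inr List.mem_cons_self
        · exact Or.inr (List.mem_cons_of_mem x h)
      · unfold pvLe at hrc ⊢; unfold pvLtP at hxc; omega
      · intro y hy
        rcases List.mem_cons.1 hy with rfl | hy'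
        · exact hrc
        · exact hrall y hy'
    · rw [if_neg hb] at hstep
      have hcx : pvLe c x := by
        unfold pvLe
        simp only [Bool.or_eq_true, Bool.and_eq_true, Bool.not_eq_eq_eq_not,
          Bool.not_true, decide_eq_true_eq, decide_eq_false_iff_not, not_or, not_and] at hb
        omega
      obtain ⟨r, heq, hrmem, hrc, hrall⟩ := ih c
      refine ⟨r, hstep.trans heq, ?_, hrc, ?_⟩
      · rcases hrmem with rfl | h
        · exact Or.inl rfl
        · exact Or.inr (List.mem_cons_of_mem x h)
      · intro y hy
        rcases List.mem_cons.1 hy with rfl | hy'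
        · unfold pvLe at hrc hcx ⊢; omega
        · exact hrall y hy'

theorem pvMin2_eq (xs : List (Int × Int)) (m : Int × Int) (hm : m ∈ xs)
    (hmin : ∀ y ∈ xs, pvLe m y) :
    PySem.List.min2? xs Prod.fst Prod.snd = some m := by
  match xs with
  | [] => simp at hm
  | x :: xs' =>
    obtain ⟨r, heq, hrmem, hrc, hrall⟩ := pvMin2_aux xs' x
    rw [heq]
    congr 1
    have h1 : pvLe m r := by
      rcases hrmem with rfl | h
      · exact hmin r List.mem_cons_self
      · exact hmin r (List.mem_cons_of_mem x h)
    have h2 : pvLe r m := by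
      rcases List.mem_cons.1 hm with rfl | h
      · exact hrc
      · exact hrall m h
    unfold pvLe at h1 h2
    exact (Prod.ext (by omega) (by omega)).symm

-- ===== outer scan loop =====

def pvStepA (g : List (List Int)) (st : PySem.Set (Int × Int) × List (Int × Int))
    (p : Int × Int) : PySem.Set (Int × Int) × List (Int × Int) :=
  if !(pvCell g p.1 p.2 == some 9) || PySem.Set.contains st.1 p then st
  else
    let fc := pvFlood g (pvH g) (pvW g) (5 * ((pvH g).toNat * (pvW g).toNat) + 1) [p] st.1 []
    (fc.1, match PySem.List.min2? fc.2 Prod.fst Prod.snd with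
           | some m => st.2 ++ [m]
           | none => st.2)

def pvInv (g : List (List Int)) (pref : List (Int × Int))
    (st : PySem.Set (Int × Int) × List (Int × Int)) : Prop :=
  (∀ x, x ∈ st.1 ↔ ∃ p ∈ pref, pvOk g p ∧ pvConn g p x) ∧
  st.2.Sublist pref ∧
  (∀ x, x ∈ st.2 ↔ x ∈ pref ∧ pvRep g x)

theorem pvScan_length (g : List (List Int)) (B : Int) :
    (pvScan g B).length = B.toNat * (pvW g).toNat := by
  unfold pvScan
  rw [List.length_flatMap]
  have : ((PySem.List.pyRange 0 B 1).map (fun r =>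
      ((PySem.List.pyRange 0 (pvW g) 1).map (fun c => ((r, c) : Int × Int))).length)) =
      (PySem.List.pyRange 0 B 1).map (fun _ => (pvW g).toNat) := by
    apply List.map_congr_left
    intro r _
    rw [List.length_map, PySem.List.length_pyRange_one]
    omega
  rw [this]
  have : ((PySem.List.pyRange 0 B 1).map (fun _ => (pvW g).toNat)) =
      List.replicate (PySem.List.pyRange 0 B 1).length (pvW g).toNat := by
    apply List.eq_replicate_iff.2
    constructor
    · rw [List.length_map]
    · intro b hb
      rcases List.mem_map.1 hb with ⟨_, _, rfl⟩
      rfl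
  rw [this, List.sum_replicate, smul_eq_mul, PySem.List.length_pyRange_one]
  have : (B - 0).toNat = B.toNat := by omega
  rw [this]

theorem pvOuter (g : List (List Int)) :
    ∀ (todo pref : List (Int × Int)) (st : PySem.Set (Int × Int) × List (Int × Int)),
      pvScan g (min (pvH g) 56) = pref ++ todo →
      pvInv g pref st →
      pvInv g (pref ++ todo) (todo.foldl (pvStepA g) st) := by
  intro todo
  induction todo with
  | nil => intro pref st _ hinv; simpa using hinv
  | cons p todo ihtodo =>
    intro pref st hscan hinv
    obtain ⟨hseen, hsub, hpos⟩ := hinv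
    rw [List.foldl_cons]
    have hmemscan : p ∈ pvScan g (min (pvH g) 56) := by
      rw [hscan]; exact List.mem_append.2 (Or.inr List.mem_cons_self)
    obtain ⟨hp1, hp2, hp3, hp4⟩ := (pvScan_mem g _ p).1 hmemscan
    have hpairs := pvScan_pairwise g (min (pvH g) 56)
    rw [hscan] at hpairs
    have hcross : ∀ a ∈ pref, ∀ b ∈ p :: todo, pvLtP a b :=
      (List.pairwise_append.1 hpairs).2.2
    have hcons : ∀ b ∈ todo, pvLtP p b :=
      (List.pairwise_cons.1 (List.pairwise_append.1 hpairs).2.1).1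
    have hnext : pvInv g (pref ++ [p]) (pvStepA g st p) := by
      by_cases hcell : pvCell g p.1 p.2 = some 9
      · by_cases hin : p ∈ st.1
        · -- already seen: step is a no-op, p is not a representative
          have hstep : pvStepA g st p = st := by
            unfold pvStepA
            rw [if_pos (by rw [(pvContains_iff st.1 p).2 hin]; simp)]
          rw [hstep]
          obtain ⟨p', hp', hok', hconn'⟩ := (hseen p).1 hin
          refine ⟨?_, hsub.trans (List.sublist_append_left pref [p]), ?_⟩
          · intro x
            rw [hseen x]
            constructor
            · rintro ⟨q, hq, h1, h2⟩
              exact ⟨q, List.mem_append.2 (Or.inl hq), h1, h2⟩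
            · rintro ⟨q, hq, h1, h2⟩
              rcases List.mem_append.1 hq with h | h
              · exact ⟨q, h, h1, h2⟩
              · have : q = p := by simpa using h
                subst this
                exact ⟨p', hp', hok', pvConn_trans g hconn' h2⟩
          · intro x
            rw [hpos x, List.mem_append]
            constructor
            · rintro ⟨h1, h2⟩; exact ⟨Or.inl h1, h2⟩
            · rintro ⟨h1 | h1, h2⟩
              · exact ⟨h1, h2⟩
              · have : x = p := by simpa using h1
                subst this
                exfalso
                have hlt : pvLtP p' x := hcross p' hp' x List.mem_cons_self
                have hle : pvLe x p' := h2.2 p' (pvConn_symm g hconn')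
                unfold pvLtP at hlt; unfold pvLe at hle; omega
        · -- new cluster: flood fill
          have hok : pvOk g p := ⟨hp1, by omega, hp3, hp4, hcell⟩
          have hdisj : ∀ y, pvConn g p y → y ∉ st.1 := by
            intro y hy hc
            obtain ⟨p', hp', hok', hconn'⟩ := (hseen y).1 hc
            exact hin ((hseen p).2 ⟨p', hp', hok', pvConn_trans g hconn' (pvConn_symm g hy)⟩)
          have hfuel : 5 * ((pvScan g (pvH g)).countP (fun q => !PySem.Set.contains st.1 q)) +
              ([p] : List (Int × Int)).length ≤ 5 * ((pvH g).toNat * (pvW g).toNat) + 1 := by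
            have h1 := List.countP_le_length (l := pvScan g (pvH g))
              (p := fun q => !PySem.Set.contains st.1 q)
            rw [pvScan_length] at h1
            simp only [List.length_cons, List.length_nil]
            omega
          obtain ⟨c1, c2, c3⟩ := pvFlood_spec g (5 * ((pvH g).toNat * (pvW g).toNat) + 1)
            [p] st.1 [] (by rintro q hq; rw [show q = p by simpa using hq]; exact hok) hfuel
          have hnewiff : ∀ x, pvNew g st.1 [p] x ↔ pvConn g p x := by
            intro x
            constructor
            · rintro ⟨s, hs, _, hr⟩
              have : s = p := by simpa using hs
              subst this
              exact pvRA_conn g st.1 s x hr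
            · intro h
              exact ⟨p, List.mem_singleton.2 rfl, hin, pvRA_of_conn g st.1 p x hdisj h⟩
          have hclmem : ∀ x, x ∈ (pvFlood g (pvH g) (pvW g)
              (5 * ((pvH g).toNat * (pvW g).toNat) + 1) [p] st.1 []).2 ↔ pvConn g p x := by
            intro x
            rw [c2 x, hnewiff x]
            simp
          have hminp : ∀ y, pvConn g p y → pvLe p y := by
            intro y hy
            by_contra hnle
            have hylt : pvLtP y p := by unfold pvLe at hnle; unfold pvLtP; omega
            have hyok : pvOk g y := by
              rcases pvConn_ok g hy with he | h
              · exfalso; apply hnle; rw [← he]; unfold pvLe; omega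
              · exact h
            have hyscan : y ∈ pvScan g (min (pvH g) 56) := by
              refine (pvScan_mem g _ y).2 ⟨hyok.1, ?_, hyok.2.2.1, hyok.2.2.2.1⟩
              have := hyok.2.1
              unfold pvLtP at hylt
              omega
            rw [hscan] at hyscan
            rcases List.mem_append.1 hyscan with hyp | hyp
            · -- y scanned earlier: its cluster (containing p) would already be seen
              exact hin ((hseen p).2 ⟨y, hyp, hyok, pvConn_symm g hy⟩)
            · rcases List.mem_cons.1 hyp with rfl | hyp'
              · unfold pvLtP at hylt; omega
              · have := hcons y hyp'
                unfold pvLtP at this hylt; omega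
          have hmin2 : PySem.List.min2? (pvFlood g (pvH g) (pvW g)
              (5 * ((pvH g).toNat * (pvW g).toNat) + 1) [p] st.1 []).2 Prod.fst Prod.snd =
              some p := by
            apply pvMin2_eq
            · exact (hclmem p).2 Relation.ReflTransGen.refl
            · intro y hy
              exact hminp y ((hclmem y).1 hy)
          have hstep : pvStepA g st p = ((pvFlood g (pvH g) (pvW g)
              (5 * ((pvH g).toNat * (pvW g).toNat) + 1) [p] st.1 []).1, st.2 ++ [p]) := by
            unfold pvStepA
            rw [if_neg (by
              rw [show (pvCell g p.1 p.2 == some 9) = true from beq_iff_eq.2 hcell]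
              rw [show PySem.Set.contains st.1 p = false from
                Bool.eq_false_iff.2 (fun hc => hin ((pvContains_iff st.1 p).1 hc))]
              simp)]
            simp only [hmin2]
          rw [hstep]
          refine ⟨?_, ?_, ?_⟩
          · intro x
            rw [c1 x, hnewiff x]
            constructor
            · rintro (h | h)
              · obtain ⟨q, hq, h1, h2⟩ := (hseen x).1 h
                exact ⟨q, List.mem_append.2 (Or.inl hq), h1, h2⟩
              · exact ⟨p, List.mem_append.2 (Or.inr (by simp)), hok, h⟩
            · rintro ⟨q, hq, h1, h2⟩
              rcases List.mem_append.1 hq with h | h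
              · exact Or.inl ((hseen x).2 ⟨q, h, h1, h2⟩)
              · have : q = p := by simpa using h
                subst this
                exact Or.inr h2
          · exact List.Sublist.append hsub (List.Sublist.refl [p])
          · intro x
            simp only [List.mem_append, List.mem_singleton]
            rw [hpos x]
            constructor
            · rintro (⟨h1, h2⟩ | rfl)
              · exact ⟨Or.inl h1, h2⟩
              · exact ⟨Or.inr rfl, hok, fun q hq => hminp q hq⟩
            · rintro ⟨h1 | h1, h2⟩
              · exact Or.inl ⟨h1, h2⟩
              · exact Or.inr h1
      · -- not a rotator cell: no-op and p is not Ok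
        have hstep : pvStepA g st p = st := by
          unfold pvStepA
          rw [if_pos (by
            rw [show (pvCell g p.1 p.2 == some 9) = false from
              beq_eq_false_iff_ne.2 hcell]
            simp)]
        rw [hstep]
        have hnok : ¬ pvOk g p := fun h => hcell h.2.2.2.2
        refine ⟨?_, hsub.trans (List.sublist_append_left pref [p]), ?_⟩
        · intro x
          rw [hseen x]
          constructor
          · rintro ⟨q, hq, h1, h2⟩
            exact ⟨q, List.mem_append.2 (Or.inl hq), h1, h2⟩
          · rintro ⟨q, hq, h1, h2⟩
            rcases List.mem_append.1 hq with h | h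
            · exact ⟨q, h, h1, h2⟩
            · have : q = p := by simpa using h
              subst this
              exact absurd h1 hnok
        · intro x
          rw [hpos x, List.mem_append]
          constructor
          · rintro ⟨h1, h2⟩; exact ⟨Or.inl h1, h2⟩
          · rintro ⟨h1 | h1, h2⟩
            · exact ⟨h1, h2⟩
            · have : x = p := by simpa using h1
              subst this
              exact absurd h2.1 hnok
    have := ihtodo (pref ++ [p]) (pvStepA g st p)
      (by rw [hscan, List.append_assoc]; rfl) hnext
    rw [List.append_assoc] at this
    simpa using this

theorem pvA_eq_fold (g : List (List Int)) :
    find_rotators_py g =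
      ((pvScan g (min (pvH g) 56)).foldl (pvStepA g) (([], []) :
        PySem.Set (Int × Int) × List (Int × Int))).2 := by
  have conv : ∀ (rows : List Int) (st : PySem.Set (Int × Int) × List (Int × Int)),
      rows.foldl (fun st r =>
        (PySem.List.pyRange 0 (pvW g) 1).foldl (fun st c =>
          if !(pvCell g r c == some 9) || PySem.Set.contains st.1 (r, c) then st
          else
            let fc := pvFlood g (pvH g) (pvW g)
              (5 * ((pvH g).toNat * (pvW g).toNat) + 1) [(r, c)] st.1 []
            (fc.1, match PySem.List.min2? fc.2 Prod.fst Prod.snd with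
                   | some m => st.2 ++ [m]
                   | none => st.2)) st) st =
      (rows.flatMap (fun r =>
        (PySem.List.pyRange 0 (pvW g) 1).map (fun c => ((r, c) : Int × Int)))).foldl
        (pvStepA g) st := by
    intro rows
    induction rows with
    | nil => intro st; rfl
    | cons r rows ih =>
      intro st
      rw [List.foldl_cons, List.flatMap_cons, List.foldl_append, ← ih]
      congr 1
      rw [List.foldl_map]
      rfl
  exact congrArg Prod.snd (conv (PySem.List.pyRange 0 (min (pvH g) 56) 1) ([], []))

theorem pvA_char (g : List (List Int)) :
    (find_rotators_py g).Pairwise pvLtP ∧ (∀ p, p ∈ find_rotators_py g ↔ pvTarget g p) := by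
  have hinv0 : pvInv g [] (([], []) : PySem.Set (Int × Int) × List (Int × Int)) := by
    refine ⟨by simp, List.Sublist.refl [], by simp⟩
  have hinv := pvOuter g (pvScan g (min (pvH g) 56)) [] ([], []) (by simp) hinv0
  rw [List.nil_append] at hinv
  obtain ⟨_, hsub, hpos⟩ := hinv
  rw [pvA_eq_fold g]
  constructor
  · exact (pvScan_pairwise g (min (pvH g) 56)).sublist hsub
  · intro p
    rw [hpos p, pvScan_mem]
    unfold pvTarget
    constructor
    · rintro ⟨hb, hrep⟩
      obtain ⟨h1, h2, h3, h4⟩ := hb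
      refine ⟨hrep, by omega⟩
    · rintro ⟨hrep, hlt⟩
      have hok := hrep.1
      exact ⟨⟨hok.1, by have := hok.2.1; omega, hok.2.2.1, hok.2.2.2.1⟩, hrep⟩

-- ===== VERDICT (by name: the statement is the Claim_ definition above) =====
theorem find_rotators_py_spec : Claim_equal_find_rotators_py := by
  intro g _ _
  unfold Spec_find_rotators_py
  obtain ⟨hpw, hmem⟩ := pvA_char g
  obtain ⟨S, hB, hnd, hSmem⟩ := pvB_char g
  have hperm : (find_rotators_py g).Perm S := by
    rw [List.perm_ext_iff_of_nodup
      ((hpw.imp (fun h => by rintro rfl; unfold pvLtP at h; omega)))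
      hnd]
    intro a; rw [hmem, hSmem]
  rw [hB, pvSorted2_eq S (find_rotators_py g) hperm hpw]
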